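-- pv_equiv track=rewrite | github.com/DancingOnAir/LeetcodePythonSolution | String/2840_check_if_strings_can_be_made_equal_with_operations_ii.py | checkStrings1
-- ===== SOURCE A (Python) =====
-- from collections import Counter
--
-- def checkStrings1(s1: str, s2: str) -> bool:
--     def helper(start):
--         c1, c2 = Counter(), Counter()
--         for i in range(start, len(s1), 2):
--             c1[s1[i]] += 1
--             c2[s2[i]] += 1
--         return c1 == c2
--     return helper(0) and helper(1)
-- ===== SOURCE B (Python) =====
-- def checkStrings1(s1: str, s2: str) -> bool:
--     n = len(s1)
--     return sorted(s1[0:n:2]) == sorted(s2[0:n:2]) and sorted(s1[1:n:2]) == sorted(s2[1:n:2])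
-- ===== Notes on version B (the rewrite author's own statement) =====
-- stated objective: simpler
-- what changed: Replaces the explicit index loop that builds two Counters per parity with extended slices s[start:len(s1):2] compared via sorted(), i.e. sort-based multiset equality in one expression instead of hash-count loops.
-- outside the precondition, e.g. on checkStrings1('ab', 'x'): A returns False, B returns False
import Mathlib
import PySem

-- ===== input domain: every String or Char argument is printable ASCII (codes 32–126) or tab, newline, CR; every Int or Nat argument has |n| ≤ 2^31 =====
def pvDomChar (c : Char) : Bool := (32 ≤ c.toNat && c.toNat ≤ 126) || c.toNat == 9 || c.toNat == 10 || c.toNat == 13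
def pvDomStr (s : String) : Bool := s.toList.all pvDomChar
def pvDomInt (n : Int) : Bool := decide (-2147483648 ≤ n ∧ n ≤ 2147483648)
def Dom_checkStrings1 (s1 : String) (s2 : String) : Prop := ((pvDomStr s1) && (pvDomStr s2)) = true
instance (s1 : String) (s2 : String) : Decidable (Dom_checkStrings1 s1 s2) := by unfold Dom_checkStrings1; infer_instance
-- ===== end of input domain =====

-- B replaces A's per-parity Counter-building index loop with extended slices compared via sorted()
-- (sort-based multiset equality); equal return values proved for len(s1) ≤ len(s2).

-- ===== PORT A =====
-- Python dict/Counter '==' ignores insertion order: same keys, same counts.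
def pvDictEq (d1 d2 : PySem.Dict Char Int) : Bool :=
  (d1.keys.all (fun k => d2.get? k == d1.get? k)) && (d2.keys.all (fun k => d1.get? k == d2.get? k))

-- one loop iteration of helper: c1[s1[i]] += 1; c2[s2[i]] += 1  (none = IndexError)
def pvStep (l1 l2 : List Char) (cs : PySem.Dict Char Int × PySem.Dict Char Int) (i : Int) :
    Option (PySem.Dict Char Int × PySem.Dict Char Int) := do
  let a ← PySem.List.pyGet? l1 i
  let b ← PySem.List.pyGet? l2 i
  pure (cs.1.modify a 0 (· + 1), cs.2.modify b 0 (· + 1))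

-- helper(start)
def pvHelper (l1 l2 : List Char) (start : Int) : Option Bool :=
  ((PySem.List.pyRange start (l1.length : Int) 2).foldlM (pvStep l1 l2)
      (PySem.Dict.empty, PySem.Dict.empty)).map (fun cs => pvDictEq cs.1 cs.2)

-- helper(0) and helper(1)  (IndexError cases are excluded by Pre_; 'false' is unreachable there)
def checkStrings1 (s1 : String) (s2 : String) : Bool :=
  match pvHelper s1.toList s2.toList 0 with
  | none => false
  | some r0 => r0 && (match pvHelper s1.toList s2.toList 1 with
                      | none => false
                      | some r1 => r1)

-- ===== PORT B =====
-- sorted(s[start:n:2]); step 2 ≠ 0, so slice? is always some and the getD [] is unreachable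
def pvSortedSlice (l : List Char) (start n : Int) : List Char :=
  PySem.List.sorted ((PySem.List.slice? l (some start) (some n) 2).getD []) (fun x => x) false

def checkStrings1_alt (s1 : String) (s2 : String) : Bool :=
  let n : Int := (s1.toList.length : Int)
  (pvSortedSlice s1.toList 0 n == pvSortedSlice s2.toList 0 n) &&
  (pvSortedSlice s1.toList 1 n == pvSortedSlice s2.toList 1 n)

-- ===== PRECONDITION & SPEC =====
-- Pre_ excludes s2 shorter than s1: there A raises IndexError on s2[i], except one accidental
-- short-circuit corner (len(s1) = len(s2)+1, len(s2) odd, even-position multisets unequal) where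
-- helper(0) returns False before the out-of-range odd index is touched — B returns the same False there.
def Pre_checkStrings1 (s1 : String) (s2 : String) : Prop := s1.toList.length ≤ s2.toList.length
instance (s1 : String) (s2 : String) : Decidable (Pre_checkStrings1 s1 s2) := by
  unfold Pre_checkStrings1; infer_instance
def pvWitness_checkStrings1 : String × String := ("abab", "baba")

def Spec_checkStrings1 (s1 : String) (s2 : String) (out : Bool) : Prop := out = checkStrings1_alt s1 s2
instance (s1 : String) (s2 : String) (out : Bool) : Decidable (Spec_checkStrings1 s1 s2 out) := by
  unfold Spec_checkStrings1; infer_instance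

-- ===== CLAIM (what is proved, stated in full; the proofs are below) =====
def Claim_equal_checkStrings1 : Prop := ∀ (s1 : String) (s2 : String), Dom_checkStrings1 s1 s2 → Pre_checkStrings1 s1 s2 → Spec_checkStrings1 s1 s2 (checkStrings1 s1 s2)

-- ===== LEMMAS AND PROOFS =====

-- get? on a counter
lemma pv_get?_counter (xs : List Char) (v : Char) :
    (PySem.Dict.counter xs).get? v = if v ∈ xs then some ((xs.count v : Int)) else none := by
  have hc : ((PySem.Dict.counter xs).get? v).isSome = xs.contains v := by
    rw [← PySem.Dict.contains_eq_isSome_get?]; exact PySem.Dict.contains_counter xs v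
  have hd : ((PySem.Dict.counter xs).get? v).getD 0 = (xs.count v : Int) := by
    rw [← PySem.Dict.getD_eq_get?_getD]; exact PySem.Dict.getD_counter xs v
  by_cases hm : v ∈ xs
  · cases h : (PySem.Dict.counter xs).get? v with
    | none => rw [h] at hc; simp [hm] at hc
    | some w => rw [h] at hd; simp at hd; simp [hm, hd]
  · cases h : (PySem.Dict.counter xs).get? v with
    | none => simp [hm]
    | some w => rw [h] at hc; simp [hm] at hc

-- Python Counter equality is multiset equality
lemma pv_dictEq_counter_iff (xs ys : List Char) :
    pvDictEq (PySem.Dict.counter xs) (PySem.Dict.counter ys) = true ↔ xs.Perm ys := by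
  constructor
  · intro h
    rw [List.perm_iff_count]
    intro v
    unfold pvDictEq at h
    simp only [Bool.and_eq_true, List.all_eq_true] at h
    obtain ⟨h1, h2⟩ := h
    by_cases hx : v ∈ xs
    · have hk : v ∈ (PySem.Dict.counter xs).keys := by
        rw [PySem.Dict.keys_counter, PySem.Set.mem_ofList]; exact hx
      have := h1 v hk
      rw [pv_get?_counter, pv_get?_counter] at this
      simp [hx] at this
      by_cases hy : v ∈ ys
      · simp [hy] at this; omega
      · simp [hy] at this
    · by_cases hy : v ∈ ys
      · have hk : v ∈ (PySem.Dict.counter ys).keys := by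
          rw [PySem.Dict.keys_counter, PySem.Set.mem_ofList]; exact hy
        have := h2 v hk
        rw [pv_get?_counter, pv_get?_counter] at this
        simp [hx, hy] at this
      · simp [List.count_eq_zero_of_not_mem, hx, hy]
  · intro h
    have hcnt := List.perm_iff_count.mp h
    have hmem : ∀ v : Char, v ∈ xs ↔ v ∈ ys := fun v => h.mem_iff
    unfold pvDictEq
    simp only [Bool.and_eq_true, List.all_eq_true]
    constructor
    · intro k hk
      rw [PySem.Dict.keys_counter, PySem.Set.mem_ofList] at hk
      rw [pv_get?_counter, pv_get?_counter]
      simp [hk, (hmem k).mp hk, hcnt k]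
    · intro k hk
      rw [PySem.Dict.keys_counter, PySem.Set.mem_ofList] at hk
      rw [pv_get?_counter, pv_get?_counter]
      simp [hk, (hmem k).mpr hk, hcnt k]

-- pyGet? on an in-range nonnegative index
lemma pv_pyGet?_in (l : List Char) (i : Int) (h0 : 0 ≤ i) (hl : i.toNat < l.length) :
    PySem.List.pyGet? l i = some (l.getD i.toNat 'a') := by
  have hi : i < (l.length : Int) := by omega
  rw [List.getD_eq_getElem?_getD, List.getElem?_eq_getElem hl]
  simp [PySem.List.pyGet?, PySem.List.pyIdx?, h0, hi]

-- the Counter-building loop succeeds and builds the counters of the indexed characters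
lemma pv_foldlM_counter (l1 l2 : List Char) (idxs : List Int)
    (h : ∀ i ∈ idxs, 0 ≤ i ∧ i.toNat < l1.length ∧ i.toNat < l2.length)
    (c1 c2 : PySem.Dict Char Int) :
    idxs.foldlM (pvStep l1 l2) (c1, c2) =
      some (idxs.foldl (fun d i => d.modify (l1.getD i.toNat 'a') 0 (· + 1)) c1,
            idxs.foldl (fun d i => d.modify (l2.getD i.toNat 'a') 0 (· + 1)) c2) := by
  induction idxs generalizing c1 c2 with
  | nil => rfl
  | cons i t ih =>
      have hi := h i (List.mem_cons_self)
      have ht : ∀ j ∈ t, 0 ≤ j ∧ j.toNat < l1.length ∧ j.toNat < l2.length :=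
        fun j hj => h j (List.mem_cons_of_mem _ hj)
      simp only [List.foldlM_cons, List.foldl_cons]
      rw [show pvStep l1 l2 (c1, c2) i =
            some (c1.modify (l1.getD i.toNat 'a') 0 (· + 1),
                  c2.modify (l2.getD i.toNat 'a') 0 (· + 1)) from by
        simp [pvStep, pv_pyGet?_in l1 i hi.1 hi.2.1, pv_pyGet?_in l2 i hi.1 hi.2.2]]
      exact ih ht _ _

-- helper(start) on admissible indices = Counter comparison of the two extracted char lists
lemma pv_helper_eq (l1 l2 : List Char) (start : Int) (h0 : 0 ≤ start)
    (hlen : l1.length ≤ l2.length) :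
    pvHelper l1 l2 start =
      some (pvDictEq
        (PySem.Dict.counter ((PySem.List.pyRange start (l1.length : Int) 2).map
          (fun i => l1.getD i.toNat 'a')))
        (PySem.Dict.counter ((PySem.List.pyRange start (l1.length : Int) 2).map
          (fun i => l2.getD i.toNat 'a')))) := by
  unfold pvHelper
  have hmem : ∀ i ∈ PySem.List.pyRange start (l1.length : Int) 2,
      0 ≤ i ∧ i.toNat < l1.length ∧ i.toNat < l2.length := by
    intro i hi
    rw [PySem.List.mem_pyRange_iff_of_pos (by norm_num)] at hi
    omega
  rw [pv_foldlM_counter l1 l2 _ hmem]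
  simp only [Option.map_some]
  rw [PySem.Dict.counter_eq_foldl, PySem.Dict.counter_eq_foldl, List.foldl_map, List.foldl_map]

-- the slice s[a:n:2] is the indexed-character list of the loop
lemma pv_slice_eq (l : List Char) (a n : Int) (h0 : 0 ≤ a) (hn : 0 ≤ n)
    (hlen : n ≤ (l.length : Int)) :
    (PySem.List.slice? l (some a) (some n) 2).getD [] =
      (PySem.List.pyRange a n 2).map (fun i => l.getD i.toNat 'a') := by
  rw [PySem.List.pyRange_of_pos a n (by norm_num)]
  simp only [PySem.List.slice?, PySem.List.sliceIndices]
  rw [if_neg (by norm_num : ¬ (2:Int) = 0)]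
  have h2 : ¬ ((2:Int) < 0) := by norm_num
  simp only [if_neg h2, if_pos (by norm_num : (0:Int) < 2), if_neg (not_lt.mpr h0),
    if_neg (not_lt.mpr hn), min_eq_left hlen]
  simp only [Option.getD_some]
  by_cases hc : a < n
  · have hs : min a (l.length : Int) = a := min_eq_left (by omega)
    rw [hs, List.map_map]
    simp only [if_pos hc]
    have hcong : ∀ x ∈ List.range ((n - a + 2 - 1) / 2).toNat,
        l[(a + 2 * (x : Int)).toNat]? = some (l.getD (a + 2 * (x : Int)).toNat 'a') := by
      intro x hx
      rw [List.mem_range] at hx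
      have hm : (a + 2 * (x : Int)).toNat < l.length := by omega
      rw [List.getD_eq_getElem?_getD, List.getElem?_eq_getElem hm]
      simp
    rw [List.filterMap_congr hcong]
    simp [Function.comp]
  · have hs : ¬ (min a (l.length : Int) < n) := by omega
    rw [if_neg hs, if_neg hc]
    simp

-- sorted-list equality is multiset equality (Bool form)
lemma pv_sortedSlice_eq (l1 l2 : List Char) (a : Int) (h0 : 0 ≤ a)
    (hlen : l1.length ≤ l2.length) :
    (pvSortedSlice l1 a (l1.length : Int) == pvSortedSlice l2 a (l1.length : Int)) =
      pvDictEq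
        (PySem.Dict.counter ((PySem.List.pyRange a (l1.length : Int) 2).map
          (fun i => l1.getD i.toNat 'a')))
        (PySem.Dict.counter ((PySem.List.pyRange a (l1.length : Int) 2).map
          (fun i => l2.getD i.toNat 'a'))) := by
  unfold pvSortedSlice
  rw [pv_slice_eq l1 a _ h0 (by positivity) (le_refl _),
      pv_slice_eq l2 a _ h0 (by positivity) (by exact_mod_cast hlen)]
  rw [Bool.eq_iff_iff]
  simp only [beq_iff_eq]
  rw [PySem.List.sorted_id_eq_sorted_id_iff_perm, pv_dictEq_counter_iff]

-- ===== VERDICT (by name: the statement is the Claim_ definition above) =====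
theorem checkStrings1_spec : Claim_equal_checkStrings1 := by
  intro s1 s2 _ hpre
  unfold Spec_checkStrings1 checkStrings1 checkStrings1_alt
  have hlen : s1.toList.length ≤ s2.toList.length := hpre
  rw [pv_helper_eq _ _ 0 (by norm_num) hlen, pv_helper_eq _ _ 1 (by norm_num) hlen]
  simp only []
  rw [pv_sortedSlice_eq _ _ 0 (by norm_num) hlen, pv_sortedSlice_eq _ _ 1 (by norm_num) hlen]
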